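-- pv_equiv track=rewrite | github.com/zana-AI/zana_planner | tm_bot/services/learning_pipeline/ingestors/youtube_ingestor.py | _subtitle_candidates
-- ===== SOURCE A (Python) =====
-- from typing import Any, Dict, List, Optional
--
-- def _subtitle_candidates(bucket: Dict[str, Any]) -> List[Dict[str, Any]]:
--     candidates: List[Dict[str, Any]] = []
--     for lang, entries in (bucket or {}).items():
--         for item in entries or []:
--             url = item.get("url")
--             if not url:
--                 continue
--             ext = item.get("ext") or ""
--             candidates.append({"lang": str(lang), "ext": str(ext), "url": str(url)})
--     # Prefer VTT and json3 over others for easier parsing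
--     priority = {"vtt": 1, "json3": 2, "srv3": 3}
--     candidates.sort(key=lambda item: priority.get(item.get("ext", "").lower(), 100))
--     return candidates
-- ===== SOURCE B (Python) =====
-- def _subtitle_candidates(bucket):
--     # One-pass bucket gather: append each candidate into its priority group,
--     # then concatenate the groups in ascending priority order (no sort call).
--     priority = {"vtt": 1, "json3": 2, "srv3": 3}
--     groups = {1: [], 2: [], 3: [], 100: []}
--     for lang, entries in (bucket or {}).items():
--         for item in entries or []:
--             url = item.get("url")
--             if not url:
--                 continue
--             ext = str(item.get("ext") or "")
--             groups[priority.get(ext.lower(), 100)].append(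
--                 {"lang": str(lang), "ext": ext, "url": str(url)})
--     return groups[1] + groups[2] + groups[3] + groups[100]
-- ===== Notes on version B (the rewrite author's own statement) =====
-- stated objective: alternative
-- what changed: Replaces the final stable sort by a single-pass bucket gather: each candidate is appended to a dict bucket keyed by its priority (1/2/3/100) while scanning, and the result is the concatenation of the four buckets in ascending priority order.
import Mathlib
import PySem

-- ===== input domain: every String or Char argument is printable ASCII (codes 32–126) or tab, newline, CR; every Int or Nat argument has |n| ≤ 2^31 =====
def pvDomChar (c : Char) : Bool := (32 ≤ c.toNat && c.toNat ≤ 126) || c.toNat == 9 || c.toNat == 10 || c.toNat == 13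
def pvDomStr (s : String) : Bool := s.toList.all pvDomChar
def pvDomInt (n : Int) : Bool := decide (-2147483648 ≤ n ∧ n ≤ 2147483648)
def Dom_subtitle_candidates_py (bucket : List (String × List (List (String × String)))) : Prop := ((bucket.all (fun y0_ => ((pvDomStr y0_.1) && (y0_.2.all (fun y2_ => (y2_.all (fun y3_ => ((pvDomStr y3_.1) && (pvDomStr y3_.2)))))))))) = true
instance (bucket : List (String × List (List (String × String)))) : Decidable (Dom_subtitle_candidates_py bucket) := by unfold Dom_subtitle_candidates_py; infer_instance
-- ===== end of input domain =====

-- B replaces A's final stable sort by a one-pass gather into priority buckets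
-- concatenated in ascending priority order (objective: alternative algorithm).

-- ===== PORT A =====
-- priority = {"vtt": 1, "json3": 2, "srv3": 3}
def pvPriority : PySem.Dict String Int :=
  PySem.Dict.ofList [("vtt", 1), ("json3", 2), ("srv3", 3)]

-- A's sort key: priority.get(item.get("ext", "").lower(), 100)
def pvKeyA (item : List (String × String)) : Int :=
  pvPriority.getD (PySem.Str.lower ((PySem.Dict.mk item).getD "ext" "")) 100

def subtitle_candidates_py (bucket : List (String × List (List (String × String)))) : List (List (String × String)) :=
  let candidates : List (List (String × String)) :=
    bucket.foldl (fun cands p =>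
      p.2.foldl (fun cands item =>
        match (PySem.Dict.mk item).get? "url" with
        | none => cands                     -- url missing: `not url`, continue
        | some url =>
          if url = "" then cands            -- url falsy: continue
          else
            -- ext = item.get("ext") or ""  (None or "" both give "")
            let ext := ((PySem.Dict.mk item).get? "ext").getD ""
            cands ++ [[("lang", p.1), ("ext", ext), ("url", url)]]) cands) []
  PySem.List.sorted candidates pvKeyA false

-- ===== PORT B =====
def subtitle_candidates_py_alt (bucket : List (String × List (List (String × String)))) : List (List (String × String)) :=
  -- groups = {1: [], 2: [], 3: [], 100: []}
  let g : PySem.Dict Int (List (List (String × String))) :=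
    bucket.foldl (fun g p =>
      p.2.foldl (fun g item =>
        match (PySem.Dict.mk item).get? "url" with
        | none => g
        | some url =>
          if url = "" then g
          else
            let ext := ((PySem.Dict.mk item).get? "ext").getD ""
            -- groups[priority.get(ext.lower(), 100)].append(...)
            g.modify (pvPriority.getD (PySem.Str.lower ext) 100) []
              (fun l => l ++ [[("lang", p.1), ("ext", ext), ("url", url)]])) g)
      (PySem.Dict.ofList [(1, []), (2, []), (3, []), (100, [])])
  g.getD 1 [] ++ g.getD 2 [] ++ g.getD 3 [] ++ g.getD 100 []

-- ===== PRECONDITION & SPEC =====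
def Spec_subtitle_candidates_py (bucket : List (String × List (List (String × String)))) (out : List (List (String × String))) : Prop := out = subtitle_candidates_py_alt bucket
instance (bucket : List (String × List (List (String × String)))) (out : List (List (String × String))) : Decidable (Spec_subtitle_candidates_py bucket out) := by unfold Spec_subtitle_candidates_py; infer_instance

-- ===== CLAIM (what is proved, stated in full; the proofs are below) =====
def Claim_equal_subtitle_candidates_py : Prop := ∀ (bucket : List (String × List (List (String × String)))), Dom_subtitle_candidates_py bucket → Spec_subtitle_candidates_py bucket (subtitle_candidates_py bucket)

-- ===== LEMMAS AND PROOFS =====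

-- insertBy walks past a prefix in which nothing comes after x
theorem pv_insertBy_append {α : Type} (before : α → α → Bool) (x : α) (l1 l2 : List α)
    (h : ∀ y ∈ l1, before x y = false) :
    PySem.List.insertBy before x (l1 ++ l2) = l1 ++ PySem.List.insertBy before x l2 := by
  induction l1 with
  | nil => simp
  | cons y ys ih =>
    simp only [List.cons_append, PySem.List.insertBy]
    rw [h y (by simp), ih (fun z hz => h z (by simp [hz]))]
    simp

theorem pv_insertBy_of_forall_before {α : Type} (before : α → α → Bool) (x : α) (l : List α)
    (h : ∀ y ∈ l, before x y = true) :
    PySem.List.insertBy before x l = x :: l := by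
  cases l with
  | nil => rfl
  | cons y ys => simp [PySem.List.insertBy, h y (by simp)]

-- the key takes only the four priority values
theorem pvPriority_getD (s : String) :
    pvPriority.getD s 100 =
      if s = "vtt" then 1 else if s = "json3" then 2 else if s = "srv3" then 3 else 100 := by
  have hit : pvPriority.items = [("vtt", 1), ("json3", 2), ("srv3", 3)] := by decide
  rw [PySem.Dict.getD_eq_get?_getD, PySem.Dict.get?, hit]
  by_cases h1 : s = "vtt"
  · subst h1; decide
  by_cases h2 : s = "json3"
  · subst h2; decide
  by_cases h3 : s = "srv3"
  · subst h3; decide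
  have b1 : ("vtt" == s) = false := by rw [beq_eq_false_iff_ne]; exact Ne.symm h1
  have b2 : ("json3" == s) = false := by rw [beq_eq_false_iff_ne]; exact Ne.symm h2
  have b3 : ("srv3" == s) = false := by rw [beq_eq_false_iff_ne]; exact Ne.symm h3
  simp [List.find?, b1, b2, b3, h1, h2, h3]

theorem pvKeyA_cases (c : List (String × String)) :
    pvKeyA c = 1 ∨ pvKeyA c = 2 ∨ pvKeyA c = 3 ∨ pvKeyA c = 100 := by
  unfold pvKeyA
  rw [pvPriority_getD]
  split_ifs <;> simp

-- inserting x into four ordered key-homogeneous buckets lands at the end of its bucket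
theorem pv_insertBy_four {α : Type} (key : α → Int) (x : α) (F1 F2 F3 F4 : List α)
    (h1 : ∀ y ∈ F1, key y = 1) (h2 : ∀ y ∈ F2, key y = 2)
    (h3 : ∀ y ∈ F3, key y = 3) (h4 : ∀ y ∈ F4, key y = 100)
    (hk : key x = 1 ∨ key x = 2 ∨ key x = 3 ∨ key x = 100) :
    PySem.List.insertBy (fun a b => decide (key a < key b)) x (F1 ++ F2 ++ F3 ++ F4) =
      (F1 ++ if key x = 1 then [x] else []) ++ (F2 ++ if key x = 2 then [x] else []) ++
      (F3 ++ if key x = 3 then [x] else []) ++ (F4 ++ if key x = 100 then [x] else []) := by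
  rcases hk with hk | hk | hk | hk
  · rw [show F1 ++ F2 ++ F3 ++ F4 = F1 ++ (F2 ++ F3 ++ F4) by simp,
      pv_insertBy_append _ _ F1 _ (fun y hy => by simp [h1 y hy, hk]),
      pv_insertBy_of_forall_before _ _ _ (fun y hy => by
        rcases List.mem_append.mp hy with hy | hy
        · rcases List.mem_append.mp hy with hy | hy
          · simp [h2 y hy, hk]
          · simp [h3 y hy, hk]
        · simp [h4 y hy, hk])]
    rw [hk]; norm_num
  · rw [show F1 ++ F2 ++ F3 ++ F4 = (F1 ++ F2) ++ (F3 ++ F4) by simp,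
      pv_insertBy_append _ _ (F1 ++ F2) _ (fun y hy => by
        rcases List.mem_append.mp hy with hy | hy
        · simp [h1 y hy, hk]
        · simp [h2 y hy, hk]),
      pv_insertBy_of_forall_before _ _ _ (fun y hy => by
        rcases List.mem_append.mp hy with hy | hy
        · simp [h3 y hy, hk]
        · simp [h4 y hy, hk])]
    rw [hk]; norm_num
  · rw [show F1 ++ F2 ++ F3 ++ F4 = (F1 ++ F2 ++ F3) ++ F4 by simp,
      pv_insertBy_append _ _ (F1 ++ F2 ++ F3) _ (fun y hy => by
        rcases List.mem_append.mp hy with hy | hy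
        · rcases List.mem_append.mp hy with hy | hy
          · simp [h1 y hy, hk]
          · simp [h2 y hy, hk]
        · simp [h3 y hy, hk]),
      pv_insertBy_of_forall_before _ _ _ (fun y hy => by simp [h4 y hy, hk])]
    rw [hk]; norm_num
  · rw [PySem.List.insertBy_of_forall_not_before _ _ _ (fun y hy => by
      rcases List.mem_append.mp hy with hy | hy
      · rcases List.mem_append.mp hy with hy | hy
        · rcases List.mem_append.mp hy with hy | hy
          · simp [h1 y hy, hk]
          · simp [h2 y hy, hk]
        · simp [h3 y hy, hk]
      · simp [h4 y hy, hk])]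
    rw [hk]; norm_num

theorem pv_sorted_buckets (l : List (List (String × String))) :
    PySem.List.sorted l pvKeyA false =
      l.filter (fun c => pvKeyA c == 1) ++ l.filter (fun c => pvKeyA c == 2) ++
      l.filter (fun c => pvKeyA c == 3) ++ l.filter (fun c => pvKeyA c == 100) := by
  induction l using List.reverseRecOn with
  | nil => rfl
  | append_singleton l x ih =>
    have hstep : PySem.List.sorted (l ++ [x]) pvKeyA false =
        PySem.List.insertBy (fun a b => decide (pvKeyA a < pvKeyA b)) x
          (PySem.List.sorted l pvKeyA false) := by
      rw [PySem.List.sorted_eq_foldl_insertBy, PySem.List.sorted_eq_foldl_insertBy,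
        List.foldl_append]
      rfl
    have hmem : ∀ (i : Int) (y : List (String × String)),
        y ∈ l.filter (fun c => pvKeyA c == i) → pvKeyA y = i := by
      intro i y hy
      have := (List.mem_filter.mp hy).2
      simpa using this
    have hfx : ∀ i : Int, (l ++ [x]).filter (fun c => pvKeyA c == i) =
        l.filter (fun c => pvKeyA c == i) ++ (if pvKeyA x = i then [x] else []) := by
      intro i
      rw [List.filter_append]
      congr 1
      by_cases h : pvKeyA x = i <;> simp [h]
    rw [hstep, ih,
      pv_insertBy_four pvKeyA x _ _ _ _ (hmem 1) (hmem 2) (hmem 3) (hmem 100)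
        (pvKeyA_cases x), hfx 1, hfx 2, hfx 3, hfx 100]

-- the key of a freshly built candidate is the priority of its ext
theorem pvKeyA_cand (lang ext url : String) :
    pvKeyA [("lang", lang), ("ext", ext), ("url", url)] =
      pvPriority.getD (PySem.Str.lower ext) 100 := by
  simp [pvKeyA, PySem.Dict.getD_eq_get?_getD, PySem.Dict.get?, List.find?]

-- B's inner step preserves the "each bucket = filter of candidates so far" invariant
theorem pv_inner_invariant (entries : List (List (String × String))) (lang : String)
    (g : PySem.Dict Int (List (List (String × String))))
    (cs : List (List (String × String)))
    (H : ∀ i : Int, g.getD i [] = cs.filter (fun c => pvKeyA c == i)) :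
    ∀ i : Int,
      (entries.foldl (fun g item =>
        match (PySem.Dict.mk item).get? "url" with
        | none => g
        | some url =>
          if url = "" then g
          else
            let ext := ((PySem.Dict.mk item).get? "ext").getD ""
            g.modify (pvPriority.getD (PySem.Str.lower ext) 100) []
              (fun l => l ++ [[("lang", lang), ("ext", ext), ("url", url)]])) g).getD i [] =
      (entries.foldl (fun cands item =>
        match (PySem.Dict.mk item).get? "url" with
        | none => cands
        | some url =>
          if url = "" then cands
          else
            let ext := ((PySem.Dict.mk item).get? "ext").getD ""
            cands ++ [[("lang", lang), ("ext", ext), ("url", url)]]) cs).filter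
        (fun c => pvKeyA c == i) := by
  induction entries generalizing g cs with
  | nil => intro i; simpa using H i
  | cons item rest ih =>
    simp only [List.foldl_cons]
    cases hurl : (PySem.Dict.mk item).get? "url" with
    | none => exact ih g cs H
    | some url =>
      by_cases hu : url = ""
      · simp only [hu, if_true]
        exact ih g cs H
      · simp only [if_neg hu]
        apply ih
        intro i
        rw [PySem.Dict.getD_modify]
        by_cases hi : i = pvPriority.getD
            (PySem.Str.lower (((PySem.Dict.mk item).get? "ext").getD "")) 100
        · subst hi
          simp [H, List.filter_append, pvKeyA_cand]
        · rw [if_neg hi, H i, List.filter_append]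
          have hf : (pvKeyA [("lang", lang), ("ext", ((PySem.Dict.mk item).get? "ext").getD ""),
              ("url", url)] == i) = false := by
            rw [pvKeyA_cand, beq_eq_false_iff_ne]
            exact fun h => hi h.symm
          simp [hf]

-- ===== VERDICT (by name: the statement is the Claim_ definition above) =====
theorem subtitle_candidates_py_spec : Claim_equal_subtitle_candidates_py := by
  intro bucket _
  unfold Spec_subtitle_candidates_py subtitle_candidates_py subtitle_candidates_py_alt
  simp only
  rw [pv_sorted_buckets]
  have main : ∀ (b : List (String × List (List (String × String))))
      (g : PySem.Dict Int (List (List (String × String))))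
      (cs : List (List (String × String)))
      (H : ∀ i : Int, g.getD i [] = cs.filter (fun c => pvKeyA c == i)),
      ∀ i : Int,
        (b.foldl (fun g p =>
          p.2.foldl (fun g item =>
            match (PySem.Dict.mk item).get? "url" with
            | none => g
            | some url =>
              if url = "" then g
              else
                let ext := ((PySem.Dict.mk item).get? "ext").getD ""
                g.modify (pvPriority.getD (PySem.Str.lower ext) 100) []
                  (fun l => l ++ [[("lang", p.1), ("ext", ext), ("url", url)]])) g) g).getD i [] =
        (b.foldl (fun cands p =>
          p.2.foldl (fun cands item =>
            match (PySem.Dict.mk item).get? "url" with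
            | none => cands
            | some url =>
              if url = "" then cands
              else
                let ext := ((PySem.Dict.mk item).get? "ext").getD ""
                cands ++ [[("lang", p.1), ("ext", ext), ("url", url)]]) cands) cs).filter
          (fun c => pvKeyA c == i) := by
    intro b
    induction b with
    | nil => intro g cs H i; simpa using H i
    | cons p rest ih =>
      intro g cs H i
      simp only [List.foldl_cons]
      exact ih _ _ (pv_inner_invariant p.2 p.1 g cs H) i
  have h0 : ∀ i : Int,
      (PySem.Dict.ofList ([(1, []), (2, []), (3, []), (100, [])] :
        List (Int × List (List (String × String))))).getD i [] = [] := by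
    intro i
    have hit : (PySem.Dict.ofList ([(1, []), (2, []), (3, []), (100, [])] :
        List (Int × List (List (String × String))))).items =
        [(1, []), (2, []), (3, []), (100, [])] := by decide
    rw [PySem.Dict.getD_eq_get?_getD, PySem.Dict.get?, hit]
    simp only [List.find?]
    by_cases h1 : ((1 : Int) == i) = true <;> by_cases h2 : ((2 : Int) == i) = true <;>
      by_cases h3 : ((3 : Int) == i) = true <;> by_cases h4 : ((100 : Int) == i) = true <;>
        simp [h1, h2, h3, h4]
  rw [main bucket _ [] (fun i => by simp [h0 i]) 1,
    main bucket _ [] (fun i => by simp [h0 i]) 2,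
    main bucket _ [] (fun i => by simp [h0 i]) 3,
    main bucket _ [] (fun i => by simp [h0 i]) 100]
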